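-- pv_equiv track=rewrite | github.com/OvsHunter/clash-royal-simulator-for-ML | scripts/update_logic_with_master.py | build_master_index
-- ===== SOURCE A (Python) =====
-- from typing import Dict, List, Optional, Tuple
--
-- def normalise_key(value: Optional[str]) -> Optional[str]:
--     """Normalise identifiers for lookups."""
--     if value is None:
--         return None
--     return "".join(ch.lower() for ch in str(value) if ch.isalnum())
--
-- def build_master_index(master_cards: List[Dict]) -> Dict[str, Dict]:
--     """Index master data by id/name/key for quick access."""
--     index: Dict[str, Dict] = {}
--     for card in master_cards:
--         keys = {
--             normalise_key(card.get("id")),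
--             normalise_key(card.get("key")),
--             normalise_key(card.get("name")),
--         }
--         for key in filter(None, keys):
--             # Prefer richer entries (more keys).
--             existing = index.get(key)
--             if existing is None or len(card.keys()) > len(existing.keys()):
--                 index[key] = card
--     return index
-- ===== SOURCE B (Python) =====
-- from typing import Dict, List, Optional
--
-- def normalise_key(value: Optional[str]) -> Optional[str]:
--     """Normalise identifiers for lookups."""
--     if value is None:
--         return None
--     return "".join(ch.lower() for ch in str(value) if ch.isalnum())
--
-- def build_master_index(master_cards: List[Dict]) -> Dict[str, Dict]:
--     """Index master data by id/name/key for quick access."""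
--     groups: Dict[str, List[Dict]] = {}
--     for card in master_cards:
--         keys = {
--             normalise_key(card.get("id")),
--             normalise_key(card.get("key")),
--             normalise_key(card.get("name")),
--         }
--         for key in filter(None, keys):
--             groups.setdefault(key, []).append(card)
--     return {key: max(cands, key=lambda c: len(c.keys()))
--             for key, cands in groups.items()}
-- ===== Notes on version B (the rewrite author's own statement) =====
-- stated objective: alternative
-- what changed: A interleaves indexing and selection in one pass (compare-and-overwrite per key); B first groups cards per normalised key into candidate lists, then selects each key's first richest candidate with max(cands, key=len) in a dict comprehension.
import Mathlib
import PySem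

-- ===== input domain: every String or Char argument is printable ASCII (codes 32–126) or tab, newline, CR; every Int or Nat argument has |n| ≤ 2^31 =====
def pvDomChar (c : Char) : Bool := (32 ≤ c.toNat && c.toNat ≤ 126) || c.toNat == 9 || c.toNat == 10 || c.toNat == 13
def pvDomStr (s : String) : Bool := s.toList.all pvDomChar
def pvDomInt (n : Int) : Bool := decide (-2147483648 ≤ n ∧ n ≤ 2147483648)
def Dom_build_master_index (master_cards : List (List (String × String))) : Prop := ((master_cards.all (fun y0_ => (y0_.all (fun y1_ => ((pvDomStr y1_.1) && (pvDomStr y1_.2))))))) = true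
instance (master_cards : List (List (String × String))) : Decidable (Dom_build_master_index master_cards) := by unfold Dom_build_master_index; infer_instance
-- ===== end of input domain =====

-- B replaces A's single pass of compare-and-overwrite with a group-then-select decomposition:
-- first group cards per normalised key, then pick each key's first richest candidate with max(...).
-- Objective: alternative decomposition, same asymptotic cost.
-- NOTE on the ports: cards are Python dicts (unique keys), so len(card.keys()) is the length of the
-- association list; A's result does not depend on the iteration order of the 3-element key set
-- (each key is updated independently and dict outputs are compared ignoring order), so both ports
-- iterate the set in PySem.Set first-insertion order.

-- ===== PORT A =====
-- normalise_key: "".join(ch.lower() for ch in str(value) if ch.isalnum())  (identical helper in A and B)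
def pvNormKey (value : Option String) : Option String :=
  match value with
  | none => none
  | some s => some (String.ofList ((s.toList.filter PySem.Chars.isalnum).map PySem.Chars.lowerChar))

-- keys = {normalise_key(card.get("id")), normalise_key(card.get("key")), normalise_key(card.get("name"))};
-- filter(None, keys) keeps the truthy elements: non-None, non-empty strings  (identical code in A and B)
def pvCardKeys (card : List (String × String)) : List String :=
  (PySem.Set.ofList
      [pvNormKey ((PySem.Dict.mk card).get? "id"),
       pvNormKey ((PySem.Dict.mk card).get? "key"),
       pvNormKey ((PySem.Dict.mk card).get? "name")]).filterMap
    (fun o => o.bind (fun s => if s = "" then none else some s))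

def build_master_index (master_cards : List (List (String × String))) : List (String × List (String × String)) :=
  (master_cards.foldl
    (fun index card =>
      (pvCardKeys card).foldl
        (fun index key =>
          match index.get? key with
          | none => index.insert key card
          | some existing => if card.length > existing.length then index.insert key card else index)
        index)
    (PySem.Dict.empty : PySem.Dict String (List (String × String)))).items

-- ===== PORT B =====
-- max(cands, key=lambda c: len(c.keys())): first candidate of maximal size; the .getD [] is a
-- totality guard only (every candidate list in groups is nonempty)
def pvRichest (cands : List (List (String × String))) : List (String × String) :=
  (PySem.List.max? cands (fun c => c.length)).getD []

def build_master_index_alt (master_cards : List (List (String × String))) : List (String × List (String × String)) :=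
  let groups : PySem.Dict String (List (List (String × String))) :=
    master_cards.foldl
      (fun g card =>
        (pvCardKeys card).foldl
          (fun g key => g.modify key [] (fun cs => cs ++ [card]))   -- groups.setdefault(key, []).append(card)
          g)
      PySem.Dict.empty
  -- {key: max(cands, key=lambda c: len(c.keys())) for key, cands in groups.items()} : groups has
  -- unique keys, so the dict comprehension is a map over its items
  groups.items.map (fun p => (p.1, pvRichest p.2))

-- ===== PRECONDITION & SPEC =====
def Spec_build_master_index (master_cards : List (List (String × String))) (out : List (String × List (String × String))) : Prop := out = build_master_index_alt master_cards
instance (master_cards : List (List (String × String))) (out : List (String × List (String × String))) : Decidable (Spec_build_master_index master_cards out) := by unfold Spec_build_master_index; infer_instance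

-- ===== CLAIM (what is proved, stated in full; the proofs are below) =====
def Claim_equal_build_master_index : Prop := ∀ (master_cards : List (List (String × String))), Dom_build_master_index master_cards → Spec_build_master_index master_cards (build_master_index master_cards)

-- ===== LEMMAS AND PROOFS =====

-- mapW g: B's final selection applied to a groups dict, as a dict
def mapW (g : PySem.Dict String (List (List (String × String)))) : PySem.Dict String (List (String × String)) :=
  PySem.Dict.mk (g.items.map (fun p => (p.1, pvRichest p.2)))

-- A's per-key update step
def stepA (idx : PySem.Dict String (List (String × String))) (key : String) (card : List (String × String)) : PySem.Dict String (List (String × String)) :=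
  match idx.get? key with
  | none => idx.insert key card
  | some existing => if card.length > existing.length then idx.insert key card else idx

lemma get?_mapW (g : PySem.Dict String (List (List (String × String)))) (k : String) :
    (mapW g).get? k = (g.get? k).map pvRichest := by
  simp [mapW, PySem.Dict.get?, List.find?_map, Function.comp_def]

lemma contains_mapW (g : PySem.Dict String (List (List (String × String)))) (k : String) :
    (mapW g).contains k = g.contains k := by
  rw [PySem.Dict.contains_eq_isSome_get?, PySem.Dict.contains_eq_isSome_get?, get?_mapW]
  cases g.get? k <;> rfl

lemma richest_append (cs : List (List (String × String))) (c : List (String × String)) :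
    PySem.List.max? (cs ++ [c]) (fun x => x.length) =
      match PySem.List.max? cs (fun x => x.length) with
      | none => some c
      | some m => if m.length < c.length then some c else some m := by
  unfold PySem.List.max?
  rw [List.foldl_append]
  generalize List.foldl _ none cs = r
  cases r <;> rfl

lemma step_key (g : PySem.Dict String (List (List (String × String)))) (hnd : g.keys.Nodup)
    (key : String) (card : List (String × String)) :
    stepA (mapW g) key card = mapW (g.modify key [] (fun cs => cs ++ [card])) := by
  unfold stepA
  rw [get?_mapW]
  cases hg : g.get? key with
  | none =>
    have hc : g.contains key = false := by
      rw [PySem.Dict.contains_eq_isSome_get?, hg]; rfl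
    have hgd : g.getD key [] = [] := PySem.Dict.getD_of_get?_eq_none _ _ hg
    have hcm : (mapW g).contains key = false := by rw [contains_mapW]; exact hc
    simp only [Option.map_none]
    show (mapW g).insert key card = _
    unfold PySem.Dict.modify
    rw [hgd]
    unfold PySem.Dict.insert
    rw [hcm, hc]
    simp [mapW, pvRichest, PySem.List.max?]
  | some cs =>
    have hc : g.contains key = true := by
      rw [PySem.Dict.contains_eq_isSome_get?, hg]; rfl
    have hgd : g.getD key [] = cs := PySem.Dict.getD_of_get?_eq_some _ _ hg
    have hcm : (mapW g).contains key = true := by rw [contains_mapW]; exact hc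
    have hval : ∀ p ∈ g.items, p.1 = key → p.2 = cs := by
      intro p hp hpk
      have := PySem.Dict.get?_of_mem_items (d := g) (k := p.1) (v := p.2) hp hnd
      rw [hpk, hg] at this
      exact (Option.some.injEq _ _ ▸ this).symm
    simp only [Option.map_some]
    unfold PySem.Dict.modify
    rw [hgd]
    unfold PySem.Dict.insert
    simp only [hc, if_true]
    by_cases hlt : card.length > (pvRichest cs).length
    · simp only [hlt, if_pos]
      show (mapW g).insert key card = _
      unfold PySem.Dict.insert
      simp only [hcm, if_true]
      unfold mapW
      simp only [List.map_map]
      congr 1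
      apply List.map_congr_left
      intro p hp
      by_cases hpk : p.1 = key
      · have hp2 := hval p hp hpk
        simp only [Function.comp_def, hpk, hp2, beq_self_eq_true, if_pos]
        have : pvRichest (cs ++ [card]) = card := by
          unfold pvRichest
          rw [richest_append]
          cases hmx : PySem.List.max? cs (fun x => x.length) with
          | none => rfl
          | some m =>
            have : pvRichest cs = m := by unfold pvRichest; rw [hmx]; rfl
            rw [this] at hlt
            simp [hlt]
        rw [this]
      · simp [hpk]
    · rw [if_neg hlt]
      unfold mapW
      simp only [List.map_map]
      apply congrArg
      apply List.map_congr_left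
      intro p hp
      by_cases hpk : p.1 = key
      · have hp2 := hval p hp hpk
        have heq : pvRichest (cs ++ [card]) = pvRichest cs := by
          unfold pvRichest
          rw [richest_append]
          cases hmx : PySem.List.max? cs (fun x => x.length) with
          | none =>
            have h0 : (pvRichest cs).length = 0 := by
              unfold pvRichest; rw [hmx]; rfl
            have hcard0 : card.length = 0 := by omega
            have : card = [] := List.length_eq_zero_iff.mp hcard0
            simp [this]
          | some m =>
            have hm : pvRichest cs = m := by unfold pvRichest; rw [hmx]; rfl
            rw [hm] at hlt
            have hnl : ¬ m.length < card.length := by omega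
            simp [hnl]
        simp [hpk, hp2, heq]
      · simp [hpk]

lemma nodup_modify (g : PySem.Dict String (List (List (String × String)))) (hnd : g.keys.Nodup)
    (key : String) (card : List (String × String)) :
    (g.modify key [] (fun cs => cs ++ [card])).keys.Nodup := by
  exact PySem.Dict.nodup_keys_insert _ _ _ hnd


lemma fold_keys (keys : List String) (card : List (String × String))
    (g : PySem.Dict String (List (List (String × String)))) (hnd : g.keys.Nodup) :
    keys.foldl (fun idx key => stepA idx key card) (mapW g) =
      mapW (keys.foldl (fun g key => g.modify key [] (fun cs => cs ++ [card])) g) ∧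
    (keys.foldl (fun g key => g.modify key [] (fun cs => cs ++ [card])) g).keys.Nodup := by
  induction keys generalizing g with
  | nil => exact ⟨rfl, hnd⟩
  | cons k ks ih =>
    simp only [List.foldl_cons]
    rw [step_key g hnd k card]
    exact ih _ (nodup_modify g hnd k card)

lemma fold_cards (cards : List (List (String × String)))
    (g : PySem.Dict String (List (List (String × String)))) (hnd : g.keys.Nodup) :
    cards.foldl
        (fun idx card => (pvCardKeys card).foldl (fun idx key => stepA idx key card) idx)
        (mapW g) =
      mapW (cards.foldl
        (fun g card => (pvCardKeys card).foldl (fun g key => g.modify key [] (fun cs => cs ++ [card])) g)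
        g) := by
  induction cards generalizing g with
  | nil => rfl
  | cons c cs ih =>
    simp only [List.foldl_cons]
    obtain ⟨h1, h2⟩ := fold_keys (pvCardKeys c) c g hnd
    rw [h1]
    exact ih _ h2

-- ===== VERDICT (by name: the statement is the Claim_ definition above) =====
theorem build_master_index_spec : Claim_equal_build_master_index := by
  intro mc _
  show build_master_index mc = build_master_index_alt mc
  have h := fold_cards mc PySem.Dict.empty (by simp [PySem.Dict.empty, PySem.Dict.keys])
  have hm : mapW PySem.Dict.empty = PySem.Dict.empty := rfl
  rw [hm] at h
  calc build_master_index mc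
      = (List.foldl (fun idx card => List.foldl (fun idx key => stepA idx key card) idx (pvCardKeys card)) PySem.Dict.empty mc).items := rfl
    _ = build_master_index_alt mc := by rw [h]; rfl
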